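-- pv_equiv track=rewrite | github.com/RushabhShahPrograms/30DaysOfCode | Day 24/Not 2.py | solve
-- ===== SOURCE A (Python) =====
-- from collections import Counter
--
-- def solve(n,nums):
--     answer = 0
--     cnt = dict(Counter(nums))
--     keys = cnt.keys()
--     for key in keys:
--         if cnt[key] == 1:
--             answer = key
--     return answer
-- ===== SOURCE B (Python) =====
-- from collections import Counter
--
-- def solve(n, nums):
--     cnt = Counter(nums)
--     for x in reversed(nums):
--         if cnt[x] == 1:
--             return x
--     return 0
-- ===== Notes on version B (the rewrite author's own statement) =====
-- stated objective: alternative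
-- what changed: Replaced the forward scan over the dict's keys that overwrites an accumulator with a reverse scan over the input list that returns the first count-1 element early (default 0).
import Mathlib
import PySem

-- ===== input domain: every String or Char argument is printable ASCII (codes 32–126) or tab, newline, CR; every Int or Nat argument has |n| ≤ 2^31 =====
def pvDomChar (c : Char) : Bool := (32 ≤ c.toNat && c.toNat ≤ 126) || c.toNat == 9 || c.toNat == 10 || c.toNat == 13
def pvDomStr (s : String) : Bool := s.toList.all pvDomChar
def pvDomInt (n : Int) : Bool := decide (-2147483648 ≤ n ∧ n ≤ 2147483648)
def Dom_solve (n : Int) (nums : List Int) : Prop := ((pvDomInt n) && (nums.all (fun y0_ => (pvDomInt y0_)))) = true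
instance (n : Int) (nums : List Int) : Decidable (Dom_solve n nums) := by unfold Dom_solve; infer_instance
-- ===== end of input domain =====

-- B changes the decomposition: instead of A's forward scan over the counter's keys overwriting
-- an accumulator, B scans the input list in reverse and returns the first count-1 element.

-- ===== PORT A =====
-- answer = 0; cnt = dict(Counter(nums)); for key in cnt.keys(): if cnt[key] == 1: answer = key; return answer
def solve (n : Int) (nums : List Int) : Int :=
  let cnt : PySem.Dict Int Int := PySem.Dict.counter nums
  (PySem.Dict.keys cnt).foldl (fun answer key => if cnt.getD key 0 == 1 then key else answer) 0

-- ===== PORT B =====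
-- for x in reversed(nums): if cnt[x] == 1: return x  — early-return loop as structural recursion
def solveAltGo (cnt : PySem.Dict Int Int) : List Int → Int
  | [] => 0
  | x :: rest => if cnt.getD x 0 == 1 then x else solveAltGo cnt rest

def solve_alt (n : Int) (nums : List Int) : Int :=
  solveAltGo (PySem.Dict.counter nums) nums.reverse

-- ===== PRECONDITION & SPEC =====
def Spec_solve (n : Int) (nums : List Int) (out : Int) : Prop := out = solve_alt n nums
instance (n : Int) (nums : List Int) (out : Int) : Decidable (Spec_solve n nums out) := by unfold Spec_solve; infer_instance

-- ===== CLAIM (what is proved, stated in full; the proofs are below) =====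
def Claim_equal_solve : Prop := ∀ (n : Int) (nums : List Int), Dom_solve n nums → Spec_solve n nums (solve n nums)

-- ===== LEMMAS AND PROOFS =====

-- A's keep-the-last-match fold is the first match of the reversed list.
lemma foldl_keep_last (p : Int → Bool) (l : List Int) (init : Int) :
    l.foldl (fun a x => if p x then x else a) init = (l.reverse.find? p).getD init := by
  induction l generalizing init with
  | nil => rfl
  | cons x t ih =>
      simp only [List.foldl_cons, List.reverse_cons, List.find?_append, ih]
      cases h : t.reverse.find? p with
      | some y => simp
      | none => cases hpx : p x <;> simp [List.find?, hpx]

-- find? is the head of the filtered list.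
lemma find?_eq_head?_filt (p : Int → Bool) (l : List Int) :
    l.find? p = (l.filter p).head? := by
  induction l with
  | nil => rfl
  | cons x t ih =>
      cases hpx : p x
      · rw [List.find?_cons_of_neg (by simp [hpx]), List.filter_cons_of_neg (by simp [hpx]), ih]
      · rw [List.find?_cons_of_pos hpx, List.filter_cons_of_pos hpx, List.head?_cons]

-- B's early-return loop is List.find? with default 0.
lemma solveAltGo_eq_find? (cnt : PySem.Dict Int Int) (l : List Int) :
    solveAltGo cnt l = (l.find? (fun x => cnt.getD x 0 == 1)).getD 0 := by
  induction l with
  | nil => rfl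
  | cons x t ih => by_cases h : cnt.getD x 0 == 1 <;> simp [solveAltGo, List.find?, h, ih]

-- dedup (first-occurrence) keeps exactly the count-1 elements, in the same positions as in the list.
lemma filter_update (p : Int → Bool) :
    ∀ (l s : List Int), (∀ x, p x = true → (s ++ l).count x = 1) →
      (PySem.Set.update s l).filter p = (s ++ l).filter p := by
  intro l
  induction l with
  | nil => intro s _; simp [PySem.Set.update]
  | cons x t ih =>
      intro s h
      have hupd : PySem.Set.update s (x :: t) = PySem.Set.update (PySem.Set.add s x) t := rfl
      rw [hupd]
      by_cases hx : PySem.Set.contains s x = true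
      · have hxmem : x ∈ s := List.mem_of_elem_eq_true hx
        have hadd : PySem.Set.add s x = s := by simp [PySem.Set.add, hxmem]
        have hpx : p x = false := by
          by_contra hc
          have hpx' : p x = true := by revert hc; cases p x <;> simp
          have := h x hpx'
          have h2 : 2 ≤ (s ++ x :: t).count x := by
            have h1 : 1 ≤ s.count x := List.one_le_count_iff.mpr hxmem
            have h2 : 1 ≤ (x :: t).count x := by simp
            simp [List.count_append]; omega
          omega
        rw [hadd, ih s (by
          intro y hy
          have hc := h y hy
          have hyx : y ≠ x := by
            intro he; subst he; exact absurd hy (by simp [hpx])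
          simp [List.count_append, Ne.symm hyx] at hc ⊢
          omega)]
        simp [List.filter_append, hpx]
      · have hxmem : x ∉ s := fun hm => hx (List.elem_eq_true_of_mem hm)
        have hadd : PySem.Set.add s x = s ++ [x] := by
          simp [PySem.Set.add, hxmem]
        rw [hadd, ih (s ++ [x]) (by
          intro y hy
          have hc := h y hy
          rcases eq_or_ne x y with he | he
          · subst he; simp [List.count_append] at hc ⊢; omega
          · simp [List.count_append, he] at hc ⊢; omega)]
        simp

lemma filter_ofList (p : Int → Bool) (l : List Int)
    (h : ∀ x, p x = true → l.count x = 1) :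
    (PySem.Set.ofList l).filter p = l.filter p := by
  have : PySem.Set.ofList l = PySem.Set.update ([] : List Int) l := rfl
  rw [this, filter_update p l [] (by simpa using h)]
  simp

-- ===== VERDICT (by name: the statement is the Claim_ definition above) =====
theorem solve_spec : Claim_equal_solve := by
  intro n nums _
  show solve n nums = solve_alt n nums
  unfold solve solve_alt
  set p : Int → Bool := fun x => ((nums.count x : Int) == 1) with hp
  have hgd : ∀ x, (PySem.Dict.counter nums).getD x 0 = (nums.count x : Int) := fun x =>
    PySem.Dict.getD_counter nums x
  have hA : (PySem.Dict.keys (PySem.Dict.counter nums)).foldl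
      (fun answer key => if (PySem.Dict.counter nums).getD key 0 == 1 then key else answer) 0
      = (PySem.Set.ofList nums).foldl (fun a x => if p x then x else a) 0 := by
    rw [PySem.Dict.keys_counter]
    exact PySem.List.foldl_congr_mem' _ _ _ _ (by intro x hx acc; simp [hgd, hp])
  rw [hA, foldl_keep_last, solveAltGo_eq_find?]
  have hB : (fun x => (PySem.Dict.counter nums).getD x 0 == 1) = p := by
    funext x; simp [hgd, hp]
  rw [hB]
  have hcount : ∀ x, p x = true → nums.count x = 1 := by
    intro x hx
    have : ((nums.count x : Int) = 1) := by simpa [hp] using hx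
    exact_mod_cast this
  have hfilters : (PySem.Set.ofList nums).filter p = nums.filter p :=
    filter_ofList p nums hcount
  rw [find?_eq_head?_filt, find?_eq_head?_filt,
      List.filter_reverse, List.filter_reverse, hfilters]
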